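-- pv_equiv track=rewrite | github.com/l7073a/citibike-pipeline | ferry/src/parse_private_ferry.py | forward_fill_header
-- ===== SOURCE A (Python) =====
-- from typing import Optional, Tuple, List, Dict, Any
--
-- def forward_fill_header(header_row: list, skip_patterns: List[str] = None) -> list:
--     """
--     Forward-fill None values in a header row (handles merged cells).
--
--     Args:
--         header_row: List of header values
--         skip_patterns: Patterns to treat as None (e.g., ['Weekday', 'Total'])
--     """
--     if skip_patterns is None:
--         skip_patterns = ['weekday', 'weekdays', 'total', 'none', 'nan', '']
--
--     result = []
--     last_value = None
--
--     for val in header_row: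
--         val_str = str(val).strip().lower() if val is not None else ''
--
--         if val is not None and val_str not in skip_patterns:
--             last_value = str(val).strip()
--
--         result.append(last_value)
--
--     return result
-- ===== SOURCE B (Python) =====
-- from typing import Optional, Tuple, List, Dict, Any
--
-- _DEFAULT_SKIPS = ['weekday', 'weekdays', 'total', 'none', 'nan', '']
--
-- def forward_fill_header(header_row: list, skip_patterns: List[str] = None) -> list:
--     """Segment-based construction: locate the kept cells, then emit the output
--     as runs (a None-prefix, then each kept value repeated until the next kept index)."""
--     skips = _DEFAULT_SKIPS if skip_patterns is None else skip_patterns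
--     keeps = [(i, str(v).strip()) for i, v in enumerate(header_row)
--              if v is not None and str(v).strip().lower() not in skips]
--     n = len(header_row)
--     out = [None] * (keeps[0][0] if keeps else n)
--     nexts = [i for i, _ in keeps[1:]] + [n]
--     for (i, s), nxt in zip(keeps, nexts):
--         out += [s] * (nxt - i)
--     return out
-- ===== Notes on version B (the rewrite author's own statement) =====
-- stated objective: alternative
-- what changed: Replaces A's element-wise scan carrying a last_value with a segment/run construction: B first collects the (index, cleaned value) pairs of kept cells, then builds the output as a None-prefix followed by each kept value replicated up to the next kept index.
import Mathlib
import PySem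

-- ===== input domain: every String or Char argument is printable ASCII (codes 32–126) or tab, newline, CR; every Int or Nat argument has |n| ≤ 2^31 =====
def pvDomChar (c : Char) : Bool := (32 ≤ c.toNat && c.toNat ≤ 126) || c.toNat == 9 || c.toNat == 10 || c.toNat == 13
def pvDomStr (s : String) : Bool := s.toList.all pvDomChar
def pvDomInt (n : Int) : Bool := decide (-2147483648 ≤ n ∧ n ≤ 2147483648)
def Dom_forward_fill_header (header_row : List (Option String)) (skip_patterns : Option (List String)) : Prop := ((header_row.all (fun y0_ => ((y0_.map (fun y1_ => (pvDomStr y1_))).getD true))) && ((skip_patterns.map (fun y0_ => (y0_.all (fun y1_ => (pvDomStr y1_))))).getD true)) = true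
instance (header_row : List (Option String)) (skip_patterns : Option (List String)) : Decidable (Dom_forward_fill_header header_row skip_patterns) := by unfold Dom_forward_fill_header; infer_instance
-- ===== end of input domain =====

-- B replaces A's element-wise scan with a segment/run construction (kept cells located first, output emitted as runs); objective: alternative, same cost.

def pvDefaultSkips : List String := ["weekday", "weekdays", "total", "none", "nan", ""]

-- ===== PORT A =====
-- A: one fused loop carrying (result, last_value); cleaning and skip test inline.
def forward_fill_header (header_row : List (Option String)) (skip_patterns : Option (List String)) : List (Option String) :=
  let skips := match skip_patterns with
    | none => pvDefaultSkips
    | some l => l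
  let step := fun (st : List (Option String) × Option String) (val : Option String) =>
    let val_str := match val with
      | some v => PySem.Str.lower (PySem.Str.strip v)
      | none => ""
    let last := match val with
      | some v => if ¬ skips.contains val_str then some (PySem.Str.strip v) else st.2
      | none => st.2
    (st.1 ++ [last], last)
  (header_row.foldl step ([], none)).1

-- ===== PORT B =====
-- B: collect (index, cleaned value) of kept cells, then emit the output as runs:
-- a None-prefix up to the first kept index, then each kept value repeated to the next kept index.
def forward_fill_header_alt (header_row : List (Option String)) (skip_patterns : Option (List String)) : List (Option String) :=
  let skips := match skip_patterns with
    | none => pvDefaultSkips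
    | some l => l
  let keeps := (PySem.List.enumerate header_row).filterMap (fun p =>
    match p.2 with
    | none => none
    | some v =>
      let s := PySem.Str.strip v
      if skips.contains (PySem.Str.lower s) then none else some (p.1, s))
  let n : Int := header_row.length
  let out := PySem.List.pyRepeat [(none : Option String)]
    (match keeps with | [] => n | (i, _) :: _ => i)
  let nexts := (keeps.drop 1).map (·.1) ++ [n]
  (keeps.zip nexts).foldl
    (fun out p => out ++ PySem.List.pyRepeat [some p.1.2] (p.2 - p.1.1)) out

-- ===== PRECONDITION & SPEC =====
def Spec_forward_fill_header (header_row : List (Option String)) (skip_patterns : Option (List String)) (out : List (Option String)) : Prop := out = forward_fill_header_alt header_row skip_patterns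
instance (header_row : List (Option String)) (skip_patterns : Option (List String)) (out : List (Option String)) : Decidable (Spec_forward_fill_header header_row skip_patterns out) := by unfold Spec_forward_fill_header; infer_instance

-- ===== CLAIM (what is proved, stated in full; the proofs are below) =====
def Claim_equal_forward_fill_header : Prop := ∀ (header_row : List (Option String)) (skip_patterns : Option (List String)), Dom_forward_fill_header header_row skip_patterns → Spec_forward_fill_header header_row skip_patterns (forward_fill_header header_row skip_patterns)

-- ===== LEMMAS AND PROOFS =====

-- proof-side spec: cleaned string, or none meaning 'keep previous value'
def pvClean (skips : List String) (val : Option String) : Option String :=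
  match val with
  | none => none
  | some v =>
    let s := PySem.Str.strip v
    if skips.contains (PySem.Str.lower s) then none else some s

-- proof-side spec: the plain forward-fill scan
def pvFill (last : Option String) : List (Option String) → List (Option String)
  | [] => []
  | m :: ms =>
    let cur := if m.isSome then m else last
    cur :: pvFill cur ms

-- proof-side: kept (index, value) pairs starting at base index b
def pvK (skips : List String) (b : Int) : List (Option String) → List (Int × String)
  | [] => []
  | x :: xs =>
    match pvClean skips x with
    | some s => (b, s) :: pvK skips (b + 1) xs
    | none => pvK skips (b + 1) xs

-- proof-side: B's run emission, recursively
def pvSeg (n : Int) : List (Int × String) → List (Option String)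
  | [] => []
  | (i, s) :: rest =>
    List.replicate ((match rest with | [] => n | (j, _) :: _ => j) - i).toNat (some s) ++ pvSeg n rest

-- A's fold equals the plain scan
theorem ffh_A_eq_fill (skips : List String) (xs : List (Option String))
    (acc : List (Option String)) (last : Option String) :
    (xs.foldl (fun (st : List (Option String) × Option String) (val : Option String) =>
      let val_str := match val with
        | some v => PySem.Str.lower (PySem.Str.strip v)
        | none => ""
      let last := match val with
        | some v => if ¬ skips.contains val_str then some (PySem.Str.strip v) else st.2
        | none => st.2
      (st.1 ++ [last], last)) (acc, last)).1
    = acc ++ pvFill last (xs.map (pvClean skips)) := by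
  induction xs generalizing acc last with
  | nil => simp [pvFill]
  | cons x xs ih =>
    rw [List.foldl_cons, ih]
    cases x with
    | none => simp [pvClean, pvFill]
    | some v =>
      by_cases h : PySem.Str.lower (PySem.Str.strip v) ∈ skips
      · simp [pvClean, pvFill, h]
      · simp [pvClean, pvFill, h]

-- B's enumerate/filterMap comprehension equals pvK
theorem ffh_keeps_eq (skips : List String) (xs : List (Option String)) (b : Int) :
    (PySem.List.enumerate xs b).filterMap (fun p =>
      match p.2 with
      | none => none
      | some v =>
        let s := PySem.Str.strip v
        if skips.contains (PySem.Str.lower s) then none else some (p.1, s))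
    = pvK skips b xs := by
  induction xs generalizing b with
  | nil => simp [PySem.List.enumerate_nil, pvK]
  | cons x xs ih =>
    rw [PySem.List.enumerate_cons, List.filterMap_cons]
    have hx : (match ((b, x) : Int × Option String).2 with
        | none => none
        | some v =>
          let s := PySem.Str.strip v
          if skips.contains (PySem.Str.lower s) then none else some (((b, x) : Int × Option String).1, s))
        = (pvClean skips x).map (fun s => (b, s)) := by
      cases x
      · simp [pvClean]
      · simp [pvClean]; split <;> simp
    rw [hx, ih (b + 1)]
    cases hc : pvClean skips x <;> simp [pvK, hc]

-- every index produced by pvK is ≥ its base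
theorem ffh_K_ge (skips : List String) (xs : List (Option String)) (b : Int) :
    ∀ p ∈ pvK skips b xs, b ≤ p.1 := by
  induction xs generalizing b with
  | nil => simp [pvK]
  | cons x xs ih =>
    intro p hp
    unfold pvK at hp
    cases hc : pvClean skips x with
    | none =>
      rw [hc] at hp
      have := ih (b + 1) p hp
      omega
    | some s =>
      rw [hc] at hp
      rcases List.mem_cons.mp hp with h | h
      · simp [h]
      · have := ih (b + 1) p h
        omega

-- B's foldl over the zipped keeps/nexts equals acc ++ pvSeg
theorem ffh_fold_eq_seg (n : Int) (ks : List (Int × String)) (acc : List (Option String)) :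
    (ks.zip ((ks.drop 1).map (·.1) ++ [n])).foldl
      (fun out p => out ++ PySem.List.pyRepeat [some p.1.2] (p.2 - p.1.1)) acc
    = acc ++ pvSeg n ks := by
  induction ks generalizing acc with
  | nil => simp [pvSeg]
  | cons k ks ih =>
    obtain ⟨i, s⟩ := k
    cases ks with
    | nil => simp [pvSeg, PySem.List.pyRepeat_singleton]
    | cons k' ks' =>
      obtain ⟨j, t⟩ := k'
      have h := ih (acc ++ PySem.List.pyRepeat [some s] (j - i))
      simp only [List.drop_one, List.tail_cons] at h
      rw [List.drop_one, List.tail_cons, List.map_cons, List.cons_append, List.zip_cons_cons,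
        List.foldl_cons, h, pvSeg, PySem.List.pyRepeat_singleton, List.append_assoc]

-- main invariant: prefix fill with `last` + runs of pvK = the plain scan
theorem ffh_G_eq_fill (skips : List String) (xs : List (Option String)) (b : Int)
    (last : Option String) :
    List.replicate ((match pvK skips b xs with
                     | [] => (b + xs.length : Int)
                     | (i, _) :: _ => i) - b).toNat last
      ++ pvSeg (b + xs.length) (pvK skips b xs)
    = pvFill last (xs.map (pvClean skips)) := by
  induction xs generalizing b last with
  | nil => simp [pvK, pvSeg, pvFill]
  | cons x xs ih =>
    cases hc : pvClean skips x with
    | none =>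
      have hK : pvK skips b (x :: xs) = pvK skips (b + 1) xs := by
        simp only [pvK, hc]
      have hfill : pvFill last ((x :: xs).map (pvClean skips))
          = last :: pvFill last (xs.map (pvClean skips)) := by
        simp [pvFill, hc]
      rw [hK, hfill, ← ih (b + 1) last]
      cases hK' : pvK skips (b + 1) xs with
      | nil =>
        simp only
        have h1 : ((b + (x :: xs).length : Int) - b).toNat = xs.length + 1 := by push_cast [List.length_cons]; omega
        have h2 : ((b + 1 + (xs.length : Int)) - (b + 1)).toNat = xs.length := by omega
        rw [h1, h2]
        simp [pvSeg, List.replicate_succ]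
      | cons p ps =>
        obtain ⟨j, t⟩ := p
        have hj : b + 1 ≤ j := ffh_K_ge skips xs (b + 1) (j, t) (by rw [hK']; exact .head _)
        have h1 : (j - b).toNat = (j - (b + 1)).toNat + 1 := by omega
        have h2 : (b + ((x :: xs).length : Int)) = (b + 1) + (xs.length : Int) := by push_cast [List.length_cons]; omega
        rw [h1, h2, List.replicate_succ]
        simp
    | some s =>
      have hK : pvK skips b (x :: xs) = (b, s) :: pvK skips (b + 1) xs := by
        simp only [pvK, hc]
      have hfill : pvFill last ((x :: xs).map (pvClean skips))
          = some s :: pvFill (some s) (xs.map (pvClean skips)) := by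
        simp [pvFill, hc]
      rw [hK, hfill, ← ih (b + 1) (some s)]
      have hb : ((b : Int) - b).toNat = 0 := by omega
      simp only [hb, List.replicate_zero, List.nil_append]
      cases hK' : pvK skips (b + 1) xs with
      | nil =>
        simp only [pvSeg]
        have h1 : ((b + ((x :: xs).length : Int)) - b).toNat = xs.length + 1 := by push_cast [List.length_cons]; omega
        have h2 : ((b + 1 + (xs.length : Int)) - (b + 1)).toNat = xs.length := by omega
        rw [h1, h2, List.replicate_succ]
        simp
      | cons p ps =>
        obtain ⟨j, t⟩ := p
        have hj : b + 1 ≤ j := ffh_K_ge skips xs (b + 1) (j, t) (by rw [hK']; exact .head _)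
        simp only [pvSeg]
        have h1 : (j - b).toNat = (j - (b + 1)).toNat + 1 := by omega
        have h2 : (b + ((x :: xs).length : Int)) = (b + 1) + (xs.length : Int) := by push_cast [List.length_cons]; omega
        rw [h1, h2, List.replicate_succ]
        simp

-- ===== VERDICT (by name: the statement is the Claim_ definition above) =====
theorem forward_fill_header_spec : Claim_equal_forward_fill_header := by
  intro header_row skip_patterns _
  unfold Spec_forward_fill_header forward_fill_header forward_fill_header_alt
  simp only
  set skips := (match skip_patterns with
    | none => pvDefaultSkips
    | some l => l) with hskips
  rw [ffh_keeps_eq skips header_row 0, ffh_fold_eq_seg, ffh_A_eq_fill skips header_row [] none,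
    List.nil_append, PySem.List.pyRepeat_singleton, ← ffh_G_eq_fill skips header_row 0 none]
  have : ∀ ks : List (Int × String),
      ((match ks with | [] => (header_row.length : Int) | (i, _) :: _ => i)).toNat
      = ((match ks with | [] => ((0 : Int) + header_row.length) | (i, _) :: _ => i) - 0).toNat := by
    intro ks; cases ks <;> simp
  rw [this, show ((0 : Int) + header_row.length) = (header_row.length : Int) by ring]
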